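-- pv_equiv track=rewrite | github.com/david-legend/python-algorithms | src/EPI_prep/recursion/generate_palindromic_decompositions/palindromic_decompositions.py | palindromic_decompostions
-- ===== SOURCE A (Python) =====
-- def palindromic_decompostions(input):
--     def directed_palindromic_decompostions(i):
--         if i >= len(input):
--             result.append(list(partition))
--
--         for j in range(i, len(input)):
--             if is_palindrome(input, i, j):
--                 partition.append(input[i:j+1])
--                 directed_palindromic_decompostions(j+1)
--                 partition.pop()
--
--     result, partition = [], []
--     directed_palindromic_decompostions(0)
--
--     return result
--
-- def is_palindrome(input, left, right):
--     while left < right: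
--         if input[left] != input[right]:
--             return False
--         left, right = left + 1, right - 1
--
--     return True
-- ===== SOURCE B (Python) =====
-- def palindromic_decompostions(input):
--     n = len(input)
--     # decomps[k] = all palindromic decompositions of the suffix input[k:]
--     decomps = [None] * n + [[[]]]
--     for i in range(n - 1, -1, -1):
--         cur = []
--         for j in range(i, n):
--             piece = input[i:j + 1]
--             if piece == piece[::-1]:
--                 for rest in decomps[j + 1]:
--                     cur.append([piece] + rest)
--         decomps[i] = cur
--     return decomps[0]
-- ===== Notes on version B (the rewrite author's own statement) =====
-- stated objective: alternative
-- what changed: Replaces A's DFS backtracking with a shared mutable partition/result and a two-pointer palindrome scan per visited node by a bottom-up dynamic program over suffixes: decomps[i] is built once from decomps[j+1], and each substring is palindrome-checked once via piece == piece[::-1].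
import Mathlib
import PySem

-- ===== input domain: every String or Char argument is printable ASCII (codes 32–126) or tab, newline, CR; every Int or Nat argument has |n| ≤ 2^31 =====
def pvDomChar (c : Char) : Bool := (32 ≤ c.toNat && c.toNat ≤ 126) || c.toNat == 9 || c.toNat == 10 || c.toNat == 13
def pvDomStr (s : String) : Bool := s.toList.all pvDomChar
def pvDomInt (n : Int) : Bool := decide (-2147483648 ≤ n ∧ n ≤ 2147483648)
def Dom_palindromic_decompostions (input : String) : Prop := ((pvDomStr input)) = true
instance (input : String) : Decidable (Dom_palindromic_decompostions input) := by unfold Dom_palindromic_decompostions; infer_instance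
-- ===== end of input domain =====

-- B replaces A's DFS backtracking (shared mutable partition/result, two-pointer palindrome scan
-- at every enumeration node) with a bottom-up dynamic program over suffixes, checking each
-- substring once via piece == piece[::-1]; same return value, proved equal.

-- ===== PORT A =====
-- is_palindrome(input, left, right): while-loop ported as recursion on right - left
def pvIsPal (s : List Char) (left right : Nat) : Bool :=
  if _h : left < right then
    if (PySem.List.pyGet? s (left : Int)) ≠ (PySem.List.pyGet? s (right : Int)) then false
    else pvIsPal s (left + 1) (right - 1)
  else true
termination_by right - left
decreasing_by omega

-- directed_palindromic_decompostions(i) and its for-loop; the mutable result/partition are the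
-- accumulator arguments; fuel bounds the recursion depth (never exhausted for the initial call).
mutual
def pvGoA (s : List Char) : Nat → Nat → List String → List (List String) → List (List String)
  | 0, _, _, result => result
  | fuel + 1, i, partition, result =>
      pvLoopA s (fuel + 1) i i partition
        (if s.length ≤ i then result ++ [partition] else result)
  termination_by fuel _ _ _ => ((fuel : Nat), s.length + 2)
  decreasing_by
    apply Prod.Lex.right; omega
def pvLoopA (s : List Char) : Nat → Nat → Nat → List String → List (List String) → List (List String)
  | 0, _, _, _, result => result
  | fuel + 1, i, j, partition, result =>
      if _h : j < s.length then
        pvLoopA s (fuel + 1) i (j + 1) partition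
          (if pvIsPal s i j then
            pvGoA s fuel (j + 1)
              (partition ++ [String.ofList (PySem.List.slice s (some (i : Int)) (some ((j + 1 : Nat) : Int)))])
              result
          else result)
      else result
  termination_by fuel _ j _ _ => (fuel, s.length + 1 - j)
  decreasing_by
    · apply Prod.Lex.left; omega
    · apply Prod.Lex.right; omega
end

def palindromic_decompostions (input : String) : List (List String) :=
  pvGoA input.toList (input.toList.length + 1) 0 [] []

-- ===== PORT B =====
-- inner loops 'for j in range(i, n): … for rest in decomps[j+1]: cur.append([piece]+rest)';
-- ds is the already-built tail [decomps[i+1], …, decomps[n]], so decomps[j+1] is ds[j-i];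
-- piece == piece[::-1] is ported as reversal of the char list (PySem.List.slice?_none_none_neg_one)
def pvRowB (s : List Char) (i : Nat) (ds : List (List (List String))) : List (List String) :=
  (PySem.List.pyRange (i : Int) (s.length : Int) 1).foldl
    (fun cur j =>
      let piece := PySem.List.slice s (some (i : Int)) (some (j + 1))
      if piece == piece.reverse then
        cur ++ (PySem.List.pyGetD ds (j - (i : Int)) []).map (fun rest => String.ofList piece :: rest)
      else cur) []

-- the outer loop 'for i in range(n-1, -1, -1): decomps[i] = cur' (array built back-to-front)
def pvBuildB (s : List Char) : Nat → List (List (List String)) → List (List (List String))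
  | 0, ds => ds
  | k + 1, ds => pvBuildB s k (pvRowB s k ds :: ds)

def palindromic_decompostions_alt (input : String) : List (List String) :=
  (pvBuildB input.toList input.toList.length [[[]]]).headD []

-- ===== PRECONDITION & SPEC =====
def Spec_palindromic_decompostions (input : String) (out : List (List String)) : Prop := out = palindromic_decompostions_alt input
instance (input : String) (out : List (List String)) : Decidable (Spec_palindromic_decompostions input out) := by unfold Spec_palindromic_decompostions; infer_instance

-- ===== CLAIM (what is proved, stated in full; the proofs are below) =====
def Claim_equal_palindromic_decompostions : Prop := ∀ (input : String), Dom_palindromic_decompostions input → Spec_palindromic_decompostions input (palindromic_decompostions input)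

-- ===== LEMMAS AND PROOFS =====

-- mathematical description of the decomposition lists, shared reference point of both ports
mutual
def pvDspec (s : List Char) (i : Nat) : List (List String) :=
  (if s.length ≤ i then [[]] else []) ++ pvDrow s i i
  termination_by (s.length + 1 - i, s.length + 3)
  decreasing_by
    simp only [Nat.min_self]; apply Prod.Lex.right; omega
def pvDrow (s : List Char) (i j : Nat) : List (List String) :=
  if _h : j < s.length then
    (if pvIsPal s i j then
       (pvDspec s (j + 1)).map (fun rest => String.ofList ((s.drop i).take (j + 1 - i)) :: rest)
     else []) ++ pvDrow s i (j + 1)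
  else []
  termination_by (s.length + 1 - min i j, s.length + 1 - j)
  decreasing_by
    · apply Prod.Lex.left; omega
    · by_cases hij0 : i ≤ j
      · rw [Nat.min_eq_left hij0, Nat.min_eq_left (by omega)]
        apply Prod.Lex.right; omega
      · rw [Nat.min_eq_right (by omega), Nat.min_eq_right (by omega)]
        apply Prod.Lex.left; omega
end

-- decomposing a segment of s at both ends
lemma pv_seg_decomp (s : List Char) (l r : Nat) (hlt : l < r) (hr : r < s.length) :
    (s.drop l).take (r + 1 - l) = s[l] :: ((s.drop (l + 1)).take (r - (l + 1)) ++ [s[r]]) := by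
  rw [List.drop_eq_getElem_cons (show l < s.length by omega)]
  rw [show r + 1 - l = (r - (l + 1) + 1) + 1 by omega]
  rw [List.take_succ_cons]
  congr 1
  rw [List.take_add_one]
  congr 1
  rw [List.getElem?_drop]
  rw [show l + 1 + (r - (l + 1)) = r by omega, List.getElem?_eq_getElem hr]
  rfl

-- A's two-pointer scan agrees with reversal comparison of the segment
lemma pv_pal_eq (s : List Char) : ∀ k l r, r - l ≤ k → l ≤ r → r < s.length →
    pvIsPal s l r = ((s.drop l).take (r + 1 - l) == ((s.drop l).take (r + 1 - l)).reverse) := by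
  intro k
  induction k with
  | zero =>
    intro l r hk hlr hr
    have hl : l = r := by omega
    subst hl
    rw [pvIsPal, dif_neg (by omega)]
    have h1 : (s.drop l).take (l + 1 - l) = [s[l]] := by
      rw [List.drop_eq_getElem_cons (show l < s.length by omega), show l + 1 - l = 1 by omega]
      simp only [List.take_succ_cons, List.take_zero]
    rw [h1]; simp
  | succ k IH =>
    intro l r hk hlr hr
    by_cases hlt : l < r
    · rw [pvIsPal, dif_pos hlt, pv_seg_decomp s l r hlt hr]
      have ha : PySem.List.pyGet? s ((l : Nat) : Int) = some s[l] := by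
        simp [PySem.List.pyGet?_natCast, List.getElem?_eq_getElem (show l < s.length by omega)]
      have hb : PySem.List.pyGet? s ((r : Nat) : Int) = some s[r] := by
        simp [PySem.List.pyGet?_natCast, List.getElem?_eq_getElem hr]
      rw [ha, hb]
      by_cases hab : s[l] = s[r]
      · rw [if_neg (by simp [hab])]
        by_cases h2 : l + 1 ≤ r - 1
        · have hIH := IH (l + 1) (r - 1) (by omega) h2 (by omega)
          rw [show r - 1 + 1 - (l + 1) = r - (l + 1) by omega] at hIH
          rw [hIH, ← hab, Bool.eq_iff_iff]
          simp only [beq_iff_eq]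
          set mid := (s.drop (l + 1)).take (r - (l + 1)) with hmid
          have hrev : (s[l] :: (mid ++ [s[l]])).reverse = s[l] :: (mid.reverse ++ [s[l]]) := by
            simp
          rw [hrev]
          simp only [List.cons.injEq, true_and, List.append_left_inj]
        · -- r = l + 1
          have hr1 : r = l + 1 := by omega
          subst hr1
          rw [pvIsPal, dif_neg (by omega)]
          simp [hab]
      · rw [if_pos (by simp [hab])]
        rw [Bool.eq_iff_iff]
        simp only [beq_iff_eq]
        set mid := (s.drop (l + 1)).take (r - (l + 1)) with hmid
        have hrev : (s[l] :: (mid ++ [s[r]])).reverse = s[r] :: (mid.reverse ++ [s[l]]) := by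
          simp
        rw [hrev]
        constructor
        · intro h; cases h
        · intro h
          exact absurd (List.cons.inj h).1 hab
    · have hl : l = r := by omega
      subst hl
      rw [pvIsPal, dif_neg (by omega)]
      have h1 : (s.drop l).take (l + 1 - l) = [s[l]] := by
        rw [List.drop_eq_getElem_cons (show l < s.length by omega), show l + 1 - l = 1 by omega]
        simp only [List.take_succ_cons, List.take_zero]
      rw [h1]; simp

-- A's recursion with accumulators produces the reference lists
lemma pv_A_main (s : List Char) : ∀ f : Nat,
    (∀ i j p r, i ≤ j → s.length ≤ f + i →
      pvLoopA s (f + 1) i j p r = r ++ (pvDrow s i j).map (fun q => p ++ q))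
    ∧ (∀ i p r, s.length ≤ f + i →
      pvGoA s (f + 1) i p r = r ++ (pvDspec s i).map (fun q => p ++ q)) := by
  intro f
  induction f using Nat.strong_induction_on with
  | _ f IHf =>
    have hloop : ∀ m i j p r, s.length - j ≤ m → i ≤ j → s.length ≤ f + i →
        pvLoopA s (f + 1) i j p r = r ++ (pvDrow s i j).map (fun q => p ++ q) := by
      intro m
      induction m with
      | zero =>
        intro i j p r hm hij hf
        have hj : ¬ j < s.length := by omega
        rw [pvLoopA, dif_neg hj, pvDrow, dif_neg hj]
        simp
      | succ m IHm =>
        intro i j p r hm hij hf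
        by_cases hj : j < s.length
        · rw [pvLoopA, dif_pos hj]
          obtain ⟨f', rfl⟩ : ∃ f', f = f' + 1 := ⟨f - 1, by omega⟩
          rw [IHm i (j + 1) p _ (by omega) (by omega) hf]
          conv_rhs => rw [pvDrow]
          rw [dif_pos hj]
          by_cases hp : pvIsPal s i j
          · rw [if_pos hp, if_pos hp]
            rw [(IHf f' (by omega)).2 (j + 1) _ r (by omega)]
            rw [PySem.List.slice_natCast]
            have hfun : (fun q : List String =>
                (p ++ [String.ofList ((s.drop i).take (j + 1 - i))]) ++ q) =
                (fun q : List String => p ++ String.ofList ((s.drop i).take (j + 1 - i)) :: q) := by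
              funext q; simp
            rw [hfun]
            simp [List.map_append, List.map_map, Function.comp_def, List.append_assoc]
          · rw [if_neg hp, if_neg hp]
            simp
        · have hj' : ¬ j < s.length := hj
          rw [pvLoopA, dif_neg hj', pvDrow, dif_neg hj']
          simp
    refine ⟨fun i j p r hij hf => hloop s.length i j p r (by omega) hij hf, ?_⟩
    intro i p r hf
    rw [pvGoA]
    rw [hloop s.length i i p _ (by omega) (le_refl i) hf]
    rw [pvDspec]
    by_cases hi : s.length ≤ i
    · rw [if_pos hi, if_pos hi]; simp
    · rw [if_neg hi, if_neg hi]; simp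

-- B's inner fold produces the reference lists
lemma pv_rowB_aux (s : List Char) (i : Nat) (ds : List (List (List String)))
    (hds : ∀ j : Nat, i ≤ j → j < s.length →
      PySem.List.pyGetD ds ((j : Int) - (i : Int)) [] = pvDspec s (j + 1)) :
    ∀ m (jn : Nat) (acc : List (List String)), s.length - jn ≤ m → i ≤ jn →
    (PySem.List.pyRange (jn : Int) (s.length : Int) 1).foldl
      (fun cur j =>
        let piece := PySem.List.slice s (some (i : Int)) (some (j + 1))
        if piece == piece.reverse then
          cur ++ (PySem.List.pyGetD ds (j - (i : Int)) []).map (fun rest => String.ofList piece :: rest)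
        else cur) acc = acc ++ pvDrow s i jn := by
  intro m
  induction m with
  | zero =>
    intro jn acc hm hij
    have hj : s.length ≤ jn := by omega
    rw [PySem.List.pyRange_one_eq_nil (by exact_mod_cast hj), List.foldl_nil,
        pvDrow, dif_neg (by omega)]
    simp
  | succ m IHm =>
    intro jn acc hm hij
    by_cases hj : jn < s.length
    · rw [PySem.List.pyRange_one_cons (by exact_mod_cast hj), List.foldl_cons]
      dsimp only
      rw [show ((jn : Int) + 1) = ((jn + 1 : Nat) : Int) by push_cast; ring]
      rw [PySem.List.slice_natCast]
      rw [← pv_pal_eq s s.length i jn (by omega) hij hj]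
      rw [hds jn hij hj]
      rw [IHm (jn + 1) _ (by omega) (by omega)]
      conv_rhs => rw [pvDrow]
      rw [dif_pos hj]
      by_cases hp : pvIsPal s i jn
      · rw [if_pos hp, if_pos hp]
        simp [List.append_assoc]
      · rw [if_neg hp, if_neg hp]
        simp
    · have hj' : s.length ≤ jn := by omega
      rw [PySem.List.pyRange_one_eq_nil (by exact_mod_cast hj'), List.foldl_nil,
          pvDrow, dif_neg (by omega)]
      simp

-- B's outer loop invariant
lemma pv_buildB_eq (s : List Char) : ∀ k, k ≤ s.length →
    pvBuildB s k ((List.range' k (s.length + 1 - k)).map (pvDspec s)) =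
      (List.range' 0 (s.length + 1)).map (pvDspec s) := by
  intro k
  induction k with
  | zero => intro _; rfl
  | succ k IH =>
    intro hk
    show pvBuildB s k _ = _
    have hrow : pvRowB s k ((List.range' (k + 1) (s.length + 1 - (k + 1))).map (pvDspec s)) =
        pvDspec s k := by
      have hds : ∀ j : Nat, k ≤ j → j < s.length →
          PySem.List.pyGetD ((List.range' (k + 1) (s.length + 1 - (k + 1))).map (pvDspec s))
            ((j : Int) - (k : Int)) [] = pvDspec s (j + 1) := by
        intro j hkj hjs
        rw [show ((j : Int) - (k : Int)) = ((j - k : Nat) : Int) by omega]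
        rw [PySem.List.pyGetD_natCast]
        rw [List.getD_eq_getElem?_getD, List.getElem?_map, List.getElem?_range']
        · simp only [Option.map_some, Option.getD_some]
          congr 1
          omega
        all_goals omega
      unfold pvRowB
      rw [pv_rowB_aux s k _ hds s.length k [] (by omega) (le_refl k)]
      rw [pvDspec, if_neg (by omega)]
    rw [hrow]
    have hcons : pvDspec s k :: (List.range' (k + 1) (s.length + 1 - (k + 1))).map (pvDspec s)
        = (List.range' k (s.length + 1 - k)).map (pvDspec s) := by
      rw [show s.length + 1 - k = (s.length + 1 - (k + 1)) + 1 by omega, List.range'_succ,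
          List.map_cons]
    rw [hcons]
    exact IH (by omega)

-- ===== VERDICT (by name: the statement is the Claim_ definition above) =====
theorem palindromic_decompostions_spec : Claim_equal_palindromic_decompostions := by
  intro input _
  show _ = _
  unfold palindromic_decompostions palindromic_decompostions_alt
  have hA := (pv_A_main input.toList input.toList.length).2 0 [] [] (by omega)
  rw [hA]
  have hinit : ([[[]]] : List (List (List String))) =
      (List.range' input.toList.length (input.toList.length + 1 - input.toList.length)).map
        (pvDspec input.toList) := by
    rw [show input.toList.length + 1 - input.toList.length = 1 by omega]
    rw [List.range'_one, List.map_cons, List.map_nil]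
    rw [pvDspec, if_pos (le_refl _), pvDrow, dif_neg (by omega)]
    rfl
  rw [hinit, pv_buildB_eq input.toList input.toList.length (le_refl _)]
  rw [List.range'_succ, List.map_cons, List.headD_cons]
  simp
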